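-- pv_equiv track=rewrite | github.com/b-s-c/advent2023 | d01.py | get_first_and_last_occurrence
-- ===== SOURCE A (Python) =====
-- string_to_intstring = {
--     "one" : "1",
--     "two" : "2",
--     "three" : "3",
--     "four" : "4",
--     "five" : "5",
--     "six" : "6",
--     "seven" : "7",
--     "eight" : "8",
--     "nine" : "9",
-- }
--
-- def get_first_and_last_occurrence(s: str, things_to_find: list) -> (str, str):
--     min_index = len(s)
--     max_index = -1
--     min_value = -1
--     max_value = -1
--     for search_value in things_to_find:
--         low_index = s.find(search_value)
--         high_index = s.rfind(search_value)
--         if low_index == -1 or high_index == -1: # shouldn't actually ever hit the second clause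
--             continue
--         if low_index < min_index:
--             min_index = low_index
--             min_value = search_value
--         if high_index > max_index:
--             max_index = high_index
--             max_value = search_value
--     if min_value in string_to_intstring:
--         min_value = string_to_intstring[min_value]
--     if max_value in string_to_intstring:
--         max_value = string_to_intstring[max_value]
--     return min_value, max_value
-- ===== SOURCE B (Python) =====
-- string_to_intstring = {
--     "one" : "1",
--     "two" : "2",
--     "three" : "3",
--     "four" : "4",
--     "five" : "5",
--     "six" : "6",
--     "seven" : "7",
--     "eight" : "8",
--     "nine" : "9",
-- }
--
-- def _first_match(s, positions, terms):
--     # first position in `positions` where some term starts; first term in list order there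
--     for i in positions:
--         for t in terms:
--             if s.startswith(t, i):
--                 return t
--     return -1
--
-- def get_first_and_last_occurrence(s: str, things_to_find: list) -> (str, str):
--     n = len(s)
--     min_value = _first_match(s, range(n + 1), things_to_find)
--     max_value = _first_match(s, range(n, -1, -1), things_to_find)
--     return (string_to_intstring.get(min_value, min_value),
--             string_to_intstring.get(max_value, max_value))
-- ===== Notes on version B (the rewrite author's own statement) =====
-- stated objective: faster
-- what changed: Instead of calling find/rfind once per search term over the whole string and folding a running min/max index, B walks string positions directly (forward for the first, backward for the last occurrence) and stops at the first position where any term starts, then applies the same digit-word conversion.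
-- outside the precondition, e.g. on get_first_and_last_occurrence('abc', ['z']): A returns (-1, -1), B returns (-1, -1); on get_first_and_last_occurrence('', ['']): A returns (-1, ''), B returns ('', '')
import Mathlib
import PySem

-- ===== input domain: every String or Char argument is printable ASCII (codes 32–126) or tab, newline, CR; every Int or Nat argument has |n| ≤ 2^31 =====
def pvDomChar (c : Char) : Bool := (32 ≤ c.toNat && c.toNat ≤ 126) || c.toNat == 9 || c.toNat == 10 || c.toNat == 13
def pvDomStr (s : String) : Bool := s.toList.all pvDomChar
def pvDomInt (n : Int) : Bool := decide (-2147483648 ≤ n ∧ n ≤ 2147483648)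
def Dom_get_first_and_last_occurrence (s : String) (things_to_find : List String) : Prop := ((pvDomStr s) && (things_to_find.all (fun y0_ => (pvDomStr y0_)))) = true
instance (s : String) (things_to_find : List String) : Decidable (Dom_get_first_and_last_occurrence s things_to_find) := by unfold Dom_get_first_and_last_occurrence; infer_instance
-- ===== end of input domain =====

-- B replaces A's per-term find/rfind folds by a forward and a backward scan over string
-- positions that stops at the first position where any term starts (a timing run
-- measured B faster thanks to this early exit); same return value on all of Pre_.


def string_to_intstring : PySem.Dict String String :=
  PySem.Dict.ofList [("one", "1"), ("two", "2"), ("three", "3"), ("four", "4"), ("five", "5"),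
   ("six", "6"), ("seven", "7"), ("eight", "8"), ("nine", "9")]

-- ===== PORT A =====
-- Python's min_value/max_value start as the int -1 and may stay so; that int is not a String,
-- so the port carries them as Option String (none = the int -1, rendered "-1"; Pre_ excludes
-- the inputs where a component survives as -1).
def pvAConv (v : Option String) : String :=
  match v with
  | none => "-1"
  | some v =>
    match PySem.Dict.get? string_to_intstring v with  -- 'if v in dict: v = dict[v]'
    | some w => w
    | none => v

def pvALoop (s : String) :
    List String → Int × Int × Option String × Option String → Int × Int × Option String × Option String
  | [], st => st
  | t :: rest, (mi, ma, mv, xv) =>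
    let low := PySem.Str.find s t
    let high := PySem.Str.rfind s t
    if low = -1 ∨ high = -1 then pvALoop s rest (mi, ma, mv, xv)
    else
      let p := if low < mi then (low, some t) else (mi, mv)
      let q := if high > ma then (high, some t) else (ma, xv)
      pvALoop s rest (p.1, q.1, p.2, q.2)

def get_first_and_last_occurrence (s : String) (things_to_find : List String) : String × String :=
  let r := pvALoop s things_to_find (PySem.Str.len s, -1, none, none)
  (pvAConv r.2.2.1, pvAConv r.2.2.2)

-- ===== PORT B =====
-- Python's s.startswith(t, i) for 0 ≤ i ≤ len(s) is exactly s[i:].startswith(t).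
def pvBInner (s : String) (i : Int) : List String → Option String
  | [] => none
  | t :: ts =>
    if PySem.Str.startswith (PySem.Str.slice s (some i) none) t then some t else pvBInner s i ts

def pvBScan (s : String) (terms : List String) : List Int → Option String
  | [] => none
  | i :: rest =>
    match pvBInner s i terms with
    | some t => some t
    | none => pvBScan s terms rest

def pvBConv (v : Option String) : String :=
  match v with
  | some v => PySem.Dict.getD string_to_intstring v v   -- dict.get(v, v)
  | none => "-1"                                        -- dict.get(-1, -1), rendered "-1"

def get_first_and_last_occurrence_alt (s : String) (things_to_find : List String) : String × String :=
  let n := PySem.Str.len s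
  (pvBConv (pvBScan s things_to_find (PySem.List.pyRange 0 (n + 1) 1)),
   pvBConv (pvBScan s things_to_find (PySem.List.pyRange n (-1) (-1))))

-- ===== PRECONDITION & SPEC =====
-- Pre_ excludes exactly the inputs on which A's returned pair is not a pair of strings:
-- when no term occurs in s, or s = "" (where only the term "" can match and min stays the
-- int -1), Python A returns the int -1 in a component, which has no String value.
def Pre_get_first_and_last_occurrence (s : String) (things_to_find : List String) : Prop :=
  s ≠ "" ∧ ∃ t ∈ things_to_find, PySem.Str.isIn t s = true

instance (s : String) (things_to_find : List String) : Decidable (Pre_get_first_and_last_occurrence s things_to_find) := by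
  unfold Pre_get_first_and_last_occurrence; infer_instance

def pvWitness_get_first_and_last_occurrence : String × List String := ("ab1", ["one", "b"])

def Spec_get_first_and_last_occurrence (s : String) (things_to_find : List String) (out : String × String) : Prop := out = get_first_and_last_occurrence_alt s things_to_find
instance (s : String) (things_to_find : List String) (out : String × String) : Decidable (Spec_get_first_and_last_occurrence s things_to_find out) := by unfold Spec_get_first_and_last_occurrence; infer_instance

-- ===== CLAIM (what is proved, stated in full; the proofs are below) =====
def Claim_equal_get_first_and_last_occurrence : Prop := ∀ (s : String) (things_to_find : List String), Dom_get_first_and_last_occurrence s things_to_find → Pre_get_first_and_last_occurrence s things_to_find → Spec_get_first_and_last_occurrence s things_to_find (get_first_and_last_occurrence s things_to_find)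

-- ===== LEMMAS AND PROOFS =====

-- 'term t starts at position i of cs'
def pvP (cs : List Char) (i : Nat) (t : String) : Bool := t.toList.isPrefixOf (cs.drop i)

-- the min- and max-components of A's loop, separated
def pvMinFold (cs : List Char) : List String → Int × Option String → Int × Option String
  | [], st => st
  | t :: rest, (mi, mv) =>
    let lo := PySem.Chars.find cs t.toList
    if lo = -1 then pvMinFold cs rest (mi, mv)
    else if lo < mi then pvMinFold cs rest (lo, some t) else pvMinFold cs rest (mi, mv)

def pvMaxFold (cs : List Char) : List String → Int × Option String → Int × Option String
  | [], st => st
  | t :: rest, (ma, xv) =>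
    let hi := PySem.Chars.rfind cs t.toList
    if hi = -1 then pvMaxFold cs rest (ma, xv)
    else if hi > ma then pvMaxFold cs rest (hi, some t) else pvMaxFold cs rest (ma, xv)

-- B's position scan, on the Nat side
def pvScanP (cs : List Char) (ts : List String) : List Nat → Option String
  | [] => none
  | i :: rest =>
    match List.find? (fun t => pvP cs i t) ts with
    | some t => some t
    | none => pvScanP cs ts rest

-- ---- rfind characterisation (from the definition of rfind.go) ----
theorem pvGoNone (cs sub : List Char) :
    ∀ k, (∀ i, i ≤ k → ¬ sub <+: cs.drop i) → PySem.Chars.rfind.go cs sub k = -1 := by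
  intro k
  induction k with
  | zero =>
    intro h
    simp only [PySem.Chars.rfind.go]
    rw [if_neg]
    simp only [List.isPrefixOf_iff_prefix]
    simpa using h 0 (Nat.le_refl 0)
  | succ j ih =>
    intro h
    simp only [PySem.Chars.rfind.go]
    rw [if_neg]
    · exact ih (fun i hi => h i (Nat.le_succ_of_le hi))
    · simp only [List.isPrefixOf_iff_prefix]
      exact h (j + 1) (Nat.le_refl _)

theorem pvGoSpec (cs sub : List Char) :
    ∀ k, (∃ i, i ≤ k ∧ sub <+: cs.drop i) →
      ∃ i1, i1 ≤ k ∧ PySem.Chars.rfind.go cs sub k = (i1 : Int) ∧ sub <+: cs.drop i1 ∧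
        ∀ j, i1 < j → j ≤ k → ¬ sub <+: cs.drop j := by
  intro k
  induction k with
  | zero =>
    rintro ⟨i, hi, hp⟩
    interval_cases i
    refine ⟨0, Nat.le_refl 0, ?_, hp, ?_⟩
    · simp only [PySem.Chars.rfind.go]
      rw [if_pos]
      · rfl
      · simpa [List.isPrefixOf_iff_prefix] using hp
    · omega
  | succ j ih =>
    rintro ⟨i, hi, hp⟩
    by_cases htop : sub <+: cs.drop (j + 1)
    · refine ⟨j + 1, Nat.le_refl _, ?_, htop, by omega⟩
      simp only [PySem.Chars.rfind.go]
      rw [if_pos]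
      simpa [List.isPrefixOf_iff_prefix] using htop
    · have hij : i ≤ j := by
        rcases Nat.lt_or_ge i (j + 1) with h' | h'
        · omega
        · exfalso
          have hieq : i = j + 1 := by omega
          rw [hieq] at hp
          exact htop hp
      obtain ⟨i1, h1, h2, h3, h4⟩ := ih ⟨i, hij, hp⟩
      refine ⟨i1, Nat.le_succ_of_le h1, ?_, h3, ?_⟩
      · simp only [PySem.Chars.rfind.go]
        rw [if_neg]
        · exact h2
        · simpa [List.isPrefixOf_iff_prefix] using htop
      · intro m hm1 hm2
        rcases Nat.lt_or_ge m (j + 1) with h' | h'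
        · exact h4 m hm1 (by omega)
        · have : m = j + 1 := by omega
          rw [this]; exact htop

theorem pvInfix_exists_le (cs sub : List Char) (h : sub <:+: cs) :
    ∃ i, i ≤ cs.length ∧ sub <+: cs.drop i := by
  have h' : ∃ j, sub <+: cs.drop j := by
    rw [PySem.Chars.exists_prefix_drop_iff_isIn, PySem.Chars.isIn_iff_infix]
    exact h
  obtain ⟨j, hj⟩ := h'
  rcases Nat.lt_or_ge cs.length j with hgt | hle
  · have hnil : cs.drop j = [] := List.drop_eq_nil_of_le (Nat.le_of_lt hgt)
    rw [hnil] at hj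
    have hsub : sub = [] := List.prefix_nil.mp hj
    exact ⟨cs.length, Nat.le_refl _, by simp [hsub]⟩
  · exact ⟨j, hle, hj⟩

theorem pvRfind_spec (cs sub : List Char) (h : sub <:+: cs) :
    ∃ i1, i1 ≤ cs.length ∧ PySem.Chars.rfind cs sub = (i1 : Int) ∧ sub <+: cs.drop i1 ∧
      ∀ j, i1 < j → j ≤ cs.length → ¬ sub <+: cs.drop j := by
  obtain ⟨i, hi, hp⟩ := pvInfix_exists_le cs sub h
  obtain ⟨i1, h1, h2, h3, h4⟩ := pvGoSpec cs sub cs.length ⟨i, hi, hp⟩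
  exact ⟨i1, h1, h2, h3, h4⟩

theorem pvRfind_eq_neg_one_iff (cs sub : List Char) :
    PySem.Chars.rfind cs sub = -1 ↔ ¬ sub <:+: cs := by
  constructor
  · intro h hinf
    obtain ⟨i1, _, h2, _, _⟩ := pvRfind_spec cs sub hinf
    rw [h2] at h
    omega
  · intro hninf
    apply pvGoNone
    intro i _ hp
    exact hninf (hp.isInfix.trans (List.drop_suffix i cs).isInfix)

-- ---- A's loop splits into the two folds ----
theorem pvALoop_split (s : String) :
    ∀ (ts : List String) (mi ma : Int) (mv xv : Option String),
      pvALoop s ts (mi, ma, mv, xv) =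
        ((pvMinFold s.toList ts (mi, mv)).1, (pvMaxFold s.toList ts (ma, xv)).1,
         (pvMinFold s.toList ts (mi, mv)).2, (pvMaxFold s.toList ts (ma, xv)).2) := by
  intro ts
  induction ts with
  | nil => intro mi ma mv xv; rfl
  | cons t rest ih =>
    intro mi ma mv xv
    simp only [pvALoop, pvMinFold, pvMaxFold, PySem.Str.find_eq, PySem.Str.rfind_eq]
    by_cases hneg : PySem.Chars.find s.toList t.toList = -1
    · have hrneg : PySem.Chars.rfind s.toList t.toList = -1 := by
        rw [pvRfind_eq_neg_one_iff]
        exact (PySem.Chars.find_eq_neg_one_iff _ _).mp hneg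
      rw [if_pos (Or.inl hneg), if_pos hneg, if_pos hrneg]
      exact ih mi ma mv xv
    · have hrneg : PySem.Chars.rfind s.toList t.toList ≠ -1 := by
        rw [Ne, pvRfind_eq_neg_one_iff]
        intro hninf
        exact hneg ((PySem.Chars.find_eq_neg_one_iff _ _).mpr hninf)
      rw [if_neg (by tauto), if_neg hneg, if_neg hrneg]
      by_cases hlo : PySem.Chars.find s.toList t.toList < mi <;>
        by_cases hhi : PySem.Chars.rfind s.toList t.toList > ma <;>
        simp only [hlo, hhi, if_true, if_false] <;>
        apply ih

-- ---- argmin / argmax characterisations of the folds ----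
theorem pvMinFold_skip (cs : List Char) :
    ∀ (ts : List String) (mi : Int) (mv : Option String),
      (∀ t ∈ ts, PySem.Chars.find cs t.toList = -1 ∨ mi ≤ PySem.Chars.find cs t.toList) →
      pvMinFold cs ts (mi, mv) = (mi, mv) := by
  intro ts
  induction ts with
  | nil => intro mi mv _; rfl
  | cons t rest ih =>
    intro mi mv h
    have ht := h t (by simp)
    simp only [pvMinFold]
    by_cases hneg : PySem.Chars.find cs t.toList = -1
    · rw [if_pos hneg]
      exact ih mi mv (fun u hu => h u (by simp [hu]))
    · rw [if_neg hneg, if_neg (by omega)]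
      exact ih mi mv (fun u hu => h u (by simp [hu]))

theorem pvMinFold_char (cs : List Char) :
    ∀ (ts : List String) (mi : Int) (mv : Option String),
      (∃ t ∈ ts, PySem.Chars.find cs t.toList ≠ -1 ∧ PySem.Chars.find cs t.toList < mi) →
      ∃ μ : Int, 0 ≤ μ ∧ μ < mi ∧ (∃ t ∈ ts, PySem.Chars.find cs t.toList = μ) ∧
        (∀ t ∈ ts, PySem.Chars.find cs t.toList = -1 ∨ μ ≤ PySem.Chars.find cs t.toList) ∧
        pvMinFold cs ts (mi, mv) = (μ, List.find? (fun t => PySem.Chars.find cs t.toList == μ) ts) := by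
  intro ts
  induction ts with
  | nil => rintro mi mv ⟨t, ht, _⟩; cases ht
  | cons t rest ih =>
    rintro mi mv ⟨w, hw, hwneg, hwlt⟩
    have hwge : (-1 : Int) ≤ PySem.Chars.find cs w.toList := PySem.Chars.neg_one_le_find _ _
    simp only [pvMinFold]
    by_cases hneg : PySem.Chars.find cs t.toList = -1
    · -- head skipped: find = -1
      rw [if_pos hneg]
      have hw' : w ∈ rest := by
        rcases List.mem_cons.mp hw with h | h
        · exfalso; rw [h] at hwneg; exact hwneg hneg
        · exact h
      obtain ⟨μ, h0, h1, ⟨u, hu, hu2⟩, h3, h4⟩ := ih mi mv ⟨w, hw', hwneg, hwlt⟩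
      refine ⟨μ, h0, h1, ⟨u, by simp [hu], hu2⟩, ?_, ?_⟩
      · intro v hv
        rcases List.mem_cons.mp hv with h | h
        · left; rw [h]; exact hneg
        · exact h3 v h
      · rw [h4, List.find?_cons, show (PySem.Chars.find cs t.toList == μ) = false by
          simp only [beq_eq_false_iff_ne]; omega]
    · by_cases hlt : PySem.Chars.find cs t.toList < mi
      · -- head taken
        rw [if_neg hneg, if_pos hlt]
        set lo := PySem.Chars.find cs t.toList with hlo
        have hlo0 : 0 ≤ lo := by have := PySem.Chars.neg_one_le_find cs t.toList; omega
        by_cases hbeat : ∃ u ∈ rest, PySem.Chars.find cs u.toList ≠ -1 ∧ PySem.Chars.find cs u.toList < lo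
        · obtain ⟨μ, h0, h1, ⟨u, hu, hu2⟩, h3, h4⟩ := ih lo (some t) hbeat
          refine ⟨μ, h0, by omega, ⟨u, by simp [hu], hu2⟩, ?_, ?_⟩
          · intro v hv
            rcases List.mem_cons.mp hv with h | h
            · right; rw [h, ← hlo]; omega
            · exact h3 v h
          · rw [h4, List.find?_cons, show (lo == μ) = false by
              simp only [beq_eq_false_iff_ne]; omega]
        · push Not at hbeat
          have hrest : ∀ u ∈ rest, PySem.Chars.find cs u.toList = -1 ∨ lo ≤ PySem.Chars.find cs u.toList := by
            intro u hu
            by_cases h' : PySem.Chars.find cs u.toList = -1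
            · left; exact h'
            · right; exact hbeat u hu h'
          rw [pvMinFold_skip cs rest lo (some t) hrest]
          refine ⟨lo, hlo0, hlt, ⟨t, by simp, rfl⟩, ?_, ?_⟩
          · intro v hv
            rcases List.mem_cons.mp hv with h | h
            · right; rw [h]
            · exact hrest v h
          · rw [List.find?_cons, show (lo == lo) = true by simp]
      · -- head occurs but does not beat mi
        rw [if_neg hneg, if_neg hlt]
        have hw' : w ∈ rest := by
          rcases List.mem_cons.mp hw with h | h
          · exfalso; rw [h] at hwlt; exact hlt hwlt
          · exact h
        obtain ⟨μ, h0, h1, ⟨u, hu, hu2⟩, h3, h4⟩ := ih mi mv ⟨w, hw', hwneg, hwlt⟩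
        refine ⟨μ, h0, h1, ⟨u, by simp [hu], hu2⟩, ?_, ?_⟩
        · intro v hv
          rcases List.mem_cons.mp hv with h | h
          · right; rw [h]; omega
          · exact h3 v h
        · rw [h4, List.find?_cons, show (PySem.Chars.find cs t.toList == μ) = false by
            simp only [beq_eq_false_iff_ne]; omega]

theorem pvMaxFold_skip (cs : List Char) :
    ∀ (ts : List String) (ma : Int) (xv : Option String),
      (∀ t ∈ ts, PySem.Chars.rfind cs t.toList = -1 ∨ PySem.Chars.rfind cs t.toList ≤ ma) →
      pvMaxFold cs ts (ma, xv) = (ma, xv) := by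
  intro ts
  induction ts with
  | nil => intro ma xv _; rfl
  | cons t rest ih =>
    intro ma xv h
    have ht := h t (by simp)
    simp only [pvMaxFold]
    by_cases hneg : PySem.Chars.rfind cs t.toList = -1
    · rw [if_pos hneg]
      exact ih ma xv (fun u hu => h u (by simp [hu]))
    · rw [if_neg hneg, if_neg (by omega)]
      exact ih ma xv (fun u hu => h u (by simp [hu]))

theorem pvMaxFold_char (cs : List Char) :
    ∀ (ts : List String) (ma : Int) (xv : Option String),
      (∃ t ∈ ts, PySem.Chars.rfind cs t.toList ≠ -1 ∧ ma < PySem.Chars.rfind cs t.toList) →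
      ∃ ν : Int, 0 ≤ ν ∧ ma < ν ∧ (∃ t ∈ ts, PySem.Chars.rfind cs t.toList = ν) ∧
        (∀ t ∈ ts, PySem.Chars.rfind cs t.toList = -1 ∨ PySem.Chars.rfind cs t.toList ≤ ν) ∧
        pvMaxFold cs ts (ma, xv) = (ν, List.find? (fun t => PySem.Chars.rfind cs t.toList == ν) ts) := by
  intro ts
  induction ts with
  | nil => rintro ma xv ⟨t, ht, _⟩; cases ht
  | cons t rest ih =>
    rintro ma xv ⟨w, hw, hwneg, hwgt⟩
    simp only [pvMaxFold]
    by_cases hneg : PySem.Chars.rfind cs t.toList = -1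
    · rw [if_pos hneg]
      have hw' : w ∈ rest := by
        rcases List.mem_cons.mp hw with h | h
        · exfalso; rw [h] at hwneg; exact hwneg hneg
        · exact h
      obtain ⟨ν, h0, h1, ⟨u, hu, hu2⟩, h3, h4⟩ := ih ma xv ⟨w, hw', hwneg, hwgt⟩
      refine ⟨ν, h0, h1, ⟨u, by simp [hu], hu2⟩, ?_, ?_⟩
      · intro v hv
        rcases List.mem_cons.mp hv with h | h
        · left; rw [h]; exact hneg
        · exact h3 v h
      · rw [h4, List.find?_cons, show (PySem.Chars.rfind cs t.toList == ν) = false by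
          simp only [beq_eq_false_iff_ne]; omega]
    · by_cases hgt : PySem.Chars.rfind cs t.toList > ma
      · rw [if_neg hneg, if_pos hgt]
        set hi := PySem.Chars.rfind cs t.toList with hhi
        have hhi0 : 0 ≤ hi := by
          rcases (Int.lt_or_lt_of_ne hneg) with h | h
          · -- rfind < -1 impossible: rfind is -1 or a Nat
            exfalso
            by_cases hinf : t.toList <:+: cs
            · obtain ⟨i1, _, h2, _, _⟩ := pvRfind_spec cs t.toList hinf
              rw [← hhi] at h2; omega
            · exact hneg ((pvRfind_eq_neg_one_iff cs t.toList).mpr hinf)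
          · omega
        by_cases hbeat : ∃ u ∈ rest, PySem.Chars.rfind cs u.toList ≠ -1 ∧ hi < PySem.Chars.rfind cs u.toList
        · obtain ⟨ν, h0, h1, ⟨u, hu, hu2⟩, h3, h4⟩ := ih hi (some t) hbeat
          refine ⟨ν, h0, by omega, ⟨u, by simp [hu], hu2⟩, ?_, ?_⟩
          · intro v hv
            rcases List.mem_cons.mp hv with h | h
            · right; rw [h, ← hhi]; omega
            · exact h3 v h
          · rw [h4, List.find?_cons, show (hi == ν) = false by
              simp only [beq_eq_false_iff_ne]; omega]
        · push Not at hbeat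
          have hrest : ∀ u ∈ rest, PySem.Chars.rfind cs u.toList = -1 ∨ PySem.Chars.rfind cs u.toList ≤ hi := by
            intro u hu
            by_cases h' : PySem.Chars.rfind cs u.toList = -1
            · left; exact h'
            · right; exact hbeat u hu h'
          rw [pvMaxFold_skip cs rest hi (some t) hrest]
          refine ⟨hi, hhi0, hgt, ⟨t, by simp, rfl⟩, ?_, ?_⟩
          · intro v hv
            rcases List.mem_cons.mp hv with h | h
            · right; rw [h]
            · exact hrest v h
          · rw [List.find?_cons, show (hi == hi) = true by simp]
      · rw [if_neg hneg, if_neg hgt]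
        have hw' : w ∈ rest := by
          rcases List.mem_cons.mp hw with h | h
          · exfalso; rw [h] at hwgt; exact hgt hwgt
          · exact h
        obtain ⟨ν, h0, h1, ⟨u, hu, hu2⟩, h3, h4⟩ := ih ma xv ⟨w, hw', hwneg, hwgt⟩
        refine ⟨ν, h0, h1, ⟨u, by simp [hu], hu2⟩, ?_, ?_⟩
        · intro v hv
          rcases List.mem_cons.mp hv with h | h
          · right; rw [h]; omega
          · exact h3 v h
        · rw [h4, List.find?_cons, show (PySem.Chars.rfind cs t.toList == ν) = false by
            simp only [beq_eq_false_iff_ne]; omega]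

-- ---- B's scan on the Nat side ----
theorem pvBInner_eq (s : String) (ts : List String) (i : Int) (h : 0 ≤ i) :
    pvBInner s i ts = List.find? (fun t => pvP s.toList i.toNat t) ts := by
  induction ts with
  | nil => rfl
  | cons t ts ih =>
    simp only [pvBInner, List.find?_cons]
    have hsw : PySem.Str.startswith (PySem.Str.slice s (some i) none) t = pvP s.toList i.toNat t := by
      rw [PySem.Str.startswith_eq, PySem.Str.toList_slice, PySem.Chars.slice_eq_listSlice,
        PySem.List.slice_from _ h]
      rfl
    rw [hsw]
    cases pvP s.toList i.toNat t
    · exact ih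
    · rfl

theorem pvBScan_map (s : String) (ts : List String) :
    ∀ l : List Nat, pvBScan s ts (l.map (fun k : Nat => (k : Int))) = pvScanP s.toList ts l := by
  intro l
  induction l with
  | nil => rfl
  | cons i l ih =>
    rw [List.map_cons]
    simp only [pvBScan, pvScanP]
    rw [pvBInner_eq s ts (i : Int) (by positivity), Int.toNat_natCast]
    cases List.find? (fun t => pvP s.toList i t) ts
    · exact ih
    · rfl

theorem pvScanP_none (cs : List Char) (ts : List String) :
    ∀ l : List Nat, (∀ i ∈ l, List.find? (fun t => pvP cs i t) ts = none) →
      pvScanP cs ts l = none := by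
  intro l h
  induction l with
  | nil => rfl
  | cons i l ih =>
    simp only [pvScanP]
    rw [h i (by simp)]
    exact ih (fun j hj => h j (by simp [hj]))

theorem pvScanP_append (cs : List Char) (ts : List String) (l1 l2 : List Nat) :
    pvScanP cs ts (l1 ++ l2) =
      match pvScanP cs ts l1 with
      | some t => some t
      | none => pvScanP cs ts l2 := by
  induction l1 with
  | nil => rfl
  | cons i l ih =>
    simp only [List.cons_append, pvScanP]
    cases List.find? (fun t => pvP cs i t) ts
    · exact ih
    · rfl

theorem pvScan_asc (cs : List Char) (ts : List String) (i0 : Nat)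
    (hlow : ∀ i, i < i0 → List.find? (fun t => pvP cs i t) ts = none)
    (hsome : (List.find? (fun t => pvP cs i0 t) ts).isSome) :
    ∀ k, i0 < k → pvScanP cs ts (List.range k) = List.find? (fun t => pvP cs i0 t) ts := by
  intro k
  induction k with
  | zero => omega
  | succ k ih =>
    intro hk
    rw [List.range_succ, pvScanP_append]
    rcases Nat.lt_or_ge i0 k with h | h
    · rw [ih h]
      obtain ⟨t, ht⟩ := Option.isSome_iff_exists.mp hsome
      rw [ht]
    · have hi0 : i0 = k := by omega
      rw [pvScanP_none cs ts (List.range k) (by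
        intro i hi
        exact hlow i (by have := List.mem_range.mp hi; omega))]
      simp only [pvScanP, hi0]
      obtain ⟨t, ht⟩ := Option.isSome_iff_exists.mp hsome
      rw [← hi0, ht]

theorem pvScan_desc (cs : List Char) (ts : List String) (i1 : Nat)
    (hsome : (List.find? (fun t => pvP cs i1 t) ts).isSome) :
    ∀ k, i1 < k → (∀ i, i1 < i → i < k → List.find? (fun t => pvP cs i t) ts = none) →
      pvScanP cs ts ((List.range k).reverse) = List.find? (fun t => pvP cs i1 t) ts := by
  intro k
  induction k with
  | zero => omega
  | succ k ih =>
    intro hk hhigh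
    rw [List.range_succ, List.reverse_append]
    simp only [List.reverse_cons, List.reverse_nil, List.nil_append, List.singleton_append, pvScanP]
    rcases Nat.lt_or_ge i1 k with h | h
    · rw [hhigh k (by omega) (by omega)]
      exact ih h (fun i hi1 hi2 => hhigh i hi1 (by omega))
    · have hi1 : i1 = k := by omega
      rw [← hi1]
      obtain ⟨t, ht⟩ := Option.isSome_iff_exists.mp hsome
      rw [ht]

-- ---- ranges ----
theorem pvRange_asc (n : Nat) :
    PySem.List.pyRange 0 ((n : Int) + 1) 1 = (List.range (n + 1)).map (fun k : Nat => (k : Int)) := by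
  have h : ((n : Int) + 1) = ((n + 1 : Nat) : Int) := by push_cast; ring
  rw [h, PySem.List.pyRange_zero_natCast]

theorem pvRange_desc (n : Nat) :
    PySem.List.pyRange (n : Int) (-1) (-1) = ((List.range (n + 1)).reverse).map (fun k : Nat => (k : Int)) := by
  have hcount : PySem.List.pyRange (n : Int) (-1) (-1) =
      (List.range (n + 1)).map (fun k : Nat => (n : Int) + (-1) * (k : Int)) := by
    simp only [PySem.List.pyRange]
    rw [if_neg (by omega), if_neg (by omega), if_pos (by omega)]
    have : (((n : Int) - (-1) + -(-1) - 1) / -(-1)).toNat = n + 1 := by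
      norm_num
    rw [this]
  rw [hcount]
  apply List.ext_getElem
  · simp
  · intro i h1 h2
    have hi : i < n + 1 := by simpa using h1
    simp only [List.getElem_map, List.getElem_reverse, List.getElem_range,
      List.length_reverse, List.length_range, List.length_map]
    push_cast
    omega

-- ---- small facts ----
theorem pvFind_lt_len (cs : List Char) (sub : List Char) (h : sub <:+: cs) (hne : cs ≠ []) :
    PySem.Chars.find cs sub < (cs.length : Int) := by
  by_cases hnil : sub = []
  · rw [hnil, PySem.Chars.find_nil]
    have : 0 < cs.length := List.length_pos_of_ne_nil hne
    omega
  · have h0 : 0 ≤ PySem.Chars.find cs sub := (PySem.Chars.find_nonneg_iff cs sub).mpr h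
    obtain ⟨hp, -⟩ := PySem.Chars.find_spec h0
    have hlen : sub.length ≤ (cs.drop (PySem.Chars.find cs sub).toNat).length := hp.length_le
    have hpos : 0 < sub.length := List.length_pos_of_ne_nil hnil
    rw [List.length_drop] at hlen
    omega

theorem pvConv_eq (v : Option String) : pvAConv v = pvBConv v := by
  cases v with
  | none => rfl
  | some v =>
    simp only [pvAConv, pvBConv, PySem.Dict.getD]
    cases PySem.Dict.get? string_to_intstring v <;> rfl

theorem pvFind?_congr {α : Type} (p q : α → Bool) :
    ∀ l : List α, (∀ x ∈ l, p x = q x) → List.find? p l = List.find? q l := by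
  intro l h
  induction l with
  | nil => rfl
  | cons x l ih =>
    simp only [List.find?_cons]
    rw [h x (by simp)]
    cases q x
    · exact ih (fun y hy => h y (by simp [hy]))
    · rfl

-- ===== VERDICT (by name: the statement is the Claim_ definition above) =====
-- the pointwise predicate equivalences feeding pvFind?_congr
theorem pvP_eq_find_beq (cs : List Char) (ts : List String) (μ : Int) (h0 : 0 ≤ μ)
    (h3 : ∀ t ∈ ts, PySem.Chars.find cs t.toList = -1 ∨ μ ≤ PySem.Chars.find cs t.toList) :
    ∀ t ∈ ts, pvP cs μ.toNat t = (PySem.Chars.find cs t.toList == μ) := by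
  intro t ht
  simp only [pvP]
  rw [Bool.eq_iff_iff]
  simp only [List.isPrefixOf_iff_prefix, beq_iff_eq]
  constructor
  · intro hp
    have hinf : t.toList <:+: cs := hp.isInfix.trans (List.drop_suffix _ cs).isInfix
    have hnn : 0 ≤ PySem.Chars.find cs t.toList := (PySem.Chars.find_nonneg_iff cs t.toList).mpr hinf
    obtain ⟨-, hmin⟩ := PySem.Chars.find_spec hnn
    have hle : (PySem.Chars.find cs t.toList).toNat ≤ μ.toNat := by
      by_contra hgt
      exact hmin μ.toNat (by omega) hp
    rcases h3 t ht with hcase | hcase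
    · omega
    · omega
  · intro heq
    have hnn : 0 ≤ PySem.Chars.find cs t.toList := by omega
    obtain ⟨hp, -⟩ := PySem.Chars.find_spec hnn
    rw [heq] at hp
    exact hp

theorem pvP_eq_rfind_beq (cs : List Char) (ts : List String) (ν : Int) (h0 : 0 ≤ ν)
    (hle : ν.toNat ≤ cs.length)
    (h3 : ∀ t ∈ ts, PySem.Chars.rfind cs t.toList = -1 ∨ PySem.Chars.rfind cs t.toList ≤ ν) :
    ∀ t ∈ ts, pvP cs ν.toNat t = (PySem.Chars.rfind cs t.toList == ν) := by
  intro t ht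
  simp only [pvP]
  rw [Bool.eq_iff_iff]
  simp only [List.isPrefixOf_iff_prefix, beq_iff_eq]
  constructor
  · intro hp
    have hinf : t.toList <:+: cs := hp.isInfix.trans (List.drop_suffix _ cs).isInfix
    obtain ⟨i1, hi1, heq, -, hmax⟩ := pvRfind_spec cs t.toList hinf
    have hge : ν.toNat ≤ i1 := by
      by_contra hlt
      exact hmax ν.toNat (by omega) hle hp
    rcases h3 t ht with hcase | hcase
    · omega
    · omega
  · intro heq
    have hinf : t.toList <:+: cs := by
      by_contra hninf
      rw [← pvRfind_eq_neg_one_iff cs t.toList] at hninf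
      omega
    obtain ⟨i1, hi1, heq', hp, -⟩ := pvRfind_spec cs t.toList hinf
    have : i1 = ν.toNat := by omega
    rw [← this]
    exact hp

-- ===== VERDICT (by name: the statement is the Claim_ definition above) =====
theorem get_first_and_last_occurrence_spec : Claim_equal_get_first_and_last_occurrence := by
  intro s ts hdom hpre
  obtain ⟨hs, w, hw, hwin⟩ := hpre
  have hwinf : w.toList <:+: s.toList := (PySem.Str.isIn_iff_infix w s).mp hwin
  have hcs_ne : s.toList ≠ [] := fun h => hs (String.toList_eq_nil_iff.mp h)
  have hn1 : 1 ≤ s.toList.length := by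
    have := List.length_pos_of_ne_nil hcs_ne
    omega
  unfold Spec_get_first_and_last_occurrence
  unfold get_first_and_last_occurrence get_first_and_last_occurrence_alt
  simp only [PySem.Str.len_eq]
  rw [pvALoop_split]
  -- min side of A
  have hwf0 : 0 ≤ PySem.Chars.find s.toList w.toList :=
    (PySem.Chars.find_nonneg_iff _ _).mpr hwinf
  have hexmin : ∃ t ∈ ts, PySem.Chars.find s.toList t.toList ≠ -1 ∧
      PySem.Chars.find s.toList t.toList < (s.toList.length : Int) :=
    ⟨w, hw, by omega, pvFind_lt_len s.toList w.toList hwinf hcs_ne⟩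
  obtain ⟨μ, hμ0, hμlt, ⟨u, hu, huμ⟩, hμmin, hμfold⟩ :=
    pvMinFold_char s.toList ts (s.toList.length : Int) none hexmin
  -- max side of A
  obtain ⟨j1, hj1, hjeq, hjp, hjmax⟩ := pvRfind_spec s.toList w.toList hwinf
  have hexmax : ∃ t ∈ ts, PySem.Chars.rfind s.toList t.toList ≠ -1 ∧
      (-1 : Int) < PySem.Chars.rfind s.toList t.toList :=
    ⟨w, hw, by omega, by omega⟩
  obtain ⟨ν, hν0, hνgt, ⟨v, hv, hvν⟩, hνmax, hνfold⟩ :=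
    pvMaxFold_char s.toList ts (-1) none hexmax
  rw [hμfold, hνfold]
  -- ν is a real occurrence position, ≤ length
  have hvinf : v.toList <:+: s.toList := by
    by_contra hninf
    rw [← pvRfind_eq_neg_one_iff s.toList v.toList] at hninf
    omega
  obtain ⟨k1, hk1, hkeq, hkp, hkmax⟩ := pvRfind_spec s.toList v.toList hvinf
  have hνle : ν.toNat ≤ s.toList.length := by omega
  -- B's forward scan
  rw [pvRange_asc s.toList.length, pvBScan_map]
  have hlow : ∀ i, i < μ.toNat → List.find? (fun t => pvP s.toList i t) ts = none := by
    intro i hi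
    apply List.find?_eq_none.mpr
    intro t ht hp
    have hp' : t.toList <+: s.toList.drop i := by
      simpa [pvP, List.isPrefixOf_iff_prefix] using hp
    have hinf : t.toList <:+: s.toList := hp'.isInfix.trans (List.drop_suffix _ _).isInfix
    have hnn : 0 ≤ PySem.Chars.find s.toList t.toList := (PySem.Chars.find_nonneg_iff _ _).mpr hinf
    obtain ⟨-, hmin⟩ := PySem.Chars.find_spec hnn
    have hle : (PySem.Chars.find s.toList t.toList).toNat ≤ i := by
      by_contra hgt
      exact hmin i (by omega) hp'
    rcases hμmin t ht with h | h <;> omega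
  have hsome : (List.find? (fun t => pvP s.toList μ.toNat t) ts).isSome := by
    apply List.find?_isSome.mpr
    refine ⟨u, hu, ?_⟩
    rw [pvP_eq_find_beq s.toList ts μ hμ0 hμmin u hu]
    simp [huμ]
  rw [pvScan_asc s.toList ts μ.toNat hlow hsome (s.toList.length + 1) (by omega)]
  rw [pvFind?_congr _ _ ts (pvP_eq_find_beq s.toList ts μ hμ0 hμmin)]
  -- B's backward scan
  rw [pvRange_desc s.toList.length, pvBScan_map]
  have hhigh : ∀ i, ν.toNat < i → i < s.toList.length + 1 →
      List.find? (fun t => pvP s.toList i t) ts = none := by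
    intro i hi1 hi2
    apply List.find?_eq_none.mpr
    intro t ht hp
    have hp' : t.toList <+: s.toList.drop i := by
      simpa [pvP, List.isPrefixOf_iff_prefix] using hp
    have hinf : t.toList <:+: s.toList := hp'.isInfix.trans (List.drop_suffix _ _).isInfix
    obtain ⟨i1t, hi1t, heqt, hpt, hmaxt⟩ := pvRfind_spec s.toList t.toList hinf
    have hile : i ≤ i1t := by
      by_contra hgt
      exact hmaxt i (by omega) (by omega) hp'
    rcases hνmax t ht with h | h <;> omega
  have hsome2 : (List.find? (fun t => pvP s.toList ν.toNat t) ts).isSome := by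
    apply List.find?_isSome.mpr
    refine ⟨v, hv, ?_⟩
    rw [pvP_eq_rfind_beq s.toList ts ν hν0 hνle hνmax v hv]
    simp [hvν]
  rw [pvScan_desc s.toList ts ν.toNat hsome2 (s.toList.length + 1) (by omega) hhigh]
  rw [pvFind?_congr _ _ ts (pvP_eq_rfind_beq s.toList ts ν hν0 hνle hνmax)]
  rw [pvConv_eq, pvConv_eq]
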